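-- pv_equiv track=rewrite | github.com/darkstar/CodingChallenges | AdventOfCode/2020/14/part2.py | dofloat
-- ===== SOURCE A (Python) =====
-- def dofloat(x, l):
--     if len(l) == 0:
--         return [ x ]
--     a = l[0]
--     b = l[1:]
--     omask = 1 << a
--     amask = ~(1 << a)
--     return dofloat(x & amask, b) + dofloat(x | omask, b)
-- ===== SOURCE B (Python) =====
-- def dofloat(x, l):
--     result = [x]
--     for a in l:
--         nxt = []
--         for v in result:
--             nxt.append(v & ~(1 << a))
--             nxt.append(v | (1 << a))
--         result = nxt
--     return result
-- ===== Notes on version B (the rewrite author's own statement) =====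
-- stated objective: alternative
-- what changed: Replaces the binary recursion (two recursive calls with list concatenation) by an iterative breadth-first expansion: a single list is rebuilt once per bit position, expanding each value into its cleared and set variants in place.
import Mathlib
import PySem

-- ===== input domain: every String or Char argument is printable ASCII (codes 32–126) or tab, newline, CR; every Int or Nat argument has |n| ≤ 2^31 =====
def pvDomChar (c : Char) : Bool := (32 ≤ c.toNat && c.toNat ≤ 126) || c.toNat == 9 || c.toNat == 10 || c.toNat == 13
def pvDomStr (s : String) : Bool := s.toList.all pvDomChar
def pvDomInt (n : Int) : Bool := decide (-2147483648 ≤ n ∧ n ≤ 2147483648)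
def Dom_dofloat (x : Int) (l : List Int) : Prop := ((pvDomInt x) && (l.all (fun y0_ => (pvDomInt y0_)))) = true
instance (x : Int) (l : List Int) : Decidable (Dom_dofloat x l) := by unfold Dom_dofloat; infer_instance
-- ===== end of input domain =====

-- B replaces A's binary recursion with an iterative per-bit expansion of a single list (alternative decomposition, same cost).


-- ===== PORT A =====
def dofloat (x : Int) (l : List Int) : List Int :=
  match l with
  | [] => [x]
  | a :: b =>
    let omask : Int := (1 : Int) <<< a.toNat
    let amask : Int := Int.not ((1 : Int) <<< a.toNat)
    dofloat (PySem.Int.band x amask) b ++ dofloat (PySem.Int.bor x omask) b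

-- ===== PORT B =====
-- expand one bit position: each value becomes (cleared, set), in order
def dofloatStep (acc : List Int) (a : Int) : List Int :=
  acc.flatMap (fun v => [PySem.Int.band v (Int.not ((1 : Int) <<< a.toNat)), PySem.Int.bor v ((1 : Int) <<< a.toNat)])

def dofloat_alt (x : Int) (l : List Int) : List Int :=
  l.foldl dofloatStep [x]

-- ===== PRECONDITION & SPEC =====
-- Pre_ excludes lists containing a negative bit position, on which the Python A raises ValueError (negative shift count).
def Pre_dofloat (x : Int) (l : List Int) : Prop := ∀ a ∈ l, 0 ≤ a
instance (x : Int) (l : List Int) : Decidable (Pre_dofloat x l) := by unfold Pre_dofloat; infer_instance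
def pvWitness_dofloat : Int × List Int := (5, [1, 3])

def Spec_dofloat (x : Int) (l : List Int) (out : List Int) : Prop := out = dofloat_alt x l
instance (x : Int) (l : List Int) (out : List Int) : Decidable (Spec_dofloat x l out) := by unfold Spec_dofloat; infer_instance

-- ===== CLAIM (what is proved, stated in full; the proofs are below) =====
def Claim_equal_dofloat : Prop := ∀ (x : Int) (l : List Int), Dom_dofloat x l → Pre_dofloat x l → Spec_dofloat x l (dofloat x l)

-- ===== LEMMAS AND PROOFS =====
theorem dofloatStep_append (u v : List Int) (a : Int) :
    dofloatStep (u ++ v) a = dofloatStep u a ++ dofloatStep v a := by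
  simp [dofloatStep]

theorem foldl_dofloatStep_append (l : List Int) (u v : List Int) :
    l.foldl dofloatStep (u ++ v) = l.foldl dofloatStep u ++ l.foldl dofloatStep v := by
  induction l generalizing u v with
  | nil => rfl
  | cons a b ih => simp [List.foldl, dofloatStep_append, ih]

theorem dofloat_eq_foldl (l : List Int) (x : Int) : dofloat x l = dofloat_alt x l := by
  induction l generalizing x with
  | nil => rfl
  | cons a b ih =>
    show dofloat (PySem.Int.band x (Int.not ((1 : Int) <<< a.toNat))) b ++ dofloat (PySem.Int.bor x ((1 : Int) <<< a.toNat)) b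
        = (a :: b).foldl dofloatStep [x]
    rw [ih, ih]
    show dofloat_alt (PySem.Int.band x (Int.not ((1 : Int) <<< a.toNat))) b ++ dofloat_alt (PySem.Int.bor x ((1 : Int) <<< a.toNat)) b
        = b.foldl dofloatStep (dofloatStep [x] a)
    have : dofloatStep [x] a
        = [PySem.Int.band x (Int.not ((1 : Int) <<< a.toNat))] ++ [PySem.Int.bor x ((1 : Int) <<< a.toNat)] := by
      simp [dofloatStep]
    rw [this, foldl_dofloatStep_append]
    rfl

-- ===== VERDICT (by name: the statement is the Claim_ definition above) =====
theorem dofloat_spec : Claim_equal_dofloat := by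
  intro x l _ _
  exact dofloat_eq_foldl l x
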